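-- pv_equiv track=rewrite | github.com/luceinaltis/Algorithm-study | HackerRank_String_Similarity.py | getZArray
-- ===== SOURCE A (Python) =====
-- def getZArray(s):
--     strLen = len(s)
--     z = [0]*strLen
--     z[0] = strLen
--
--     l = -1
--     r = -1
--     for i in range(1, strLen):
--         if r < i:
--             l = i
--             r = i
--             while r < strLen and s[r] == s[r - l]:
--                 r += 1
--             z[l] = r - l
--             r -= 1
--         else:
--             k = i - l
--             if z[k] < r - i + 1:
--                 z[i] = z[k]
--             else:
--                 l = i
--                 while r < strLen and s[r] == s[r-l]:
--                     r += 1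
--                 z[i] = r - l
--                 r -= 1
--
--     ansSum = 0
--     for i in z:
--         ansSum += i
--
--     return ansSum
-- ===== SOURCE B (Python) =====
-- def getZArray(s):
--     n = len(s)
--     total = 0
--     for i in range(n):
--         k = 0
--         while i + k < n and s[i + k] == s[k]:
--             k += 1
--         total += k
--     return total
-- ===== Notes on version B (the rewrite author's own statement) =====
-- stated objective: simpler
-- what changed: Replaces the Z-algorithm's l/r-window bookkeeping and explicit Z-array with a direct two-level scan that sums, for each i, the longest common prefix of s and s[i:].
import Mathlib
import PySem

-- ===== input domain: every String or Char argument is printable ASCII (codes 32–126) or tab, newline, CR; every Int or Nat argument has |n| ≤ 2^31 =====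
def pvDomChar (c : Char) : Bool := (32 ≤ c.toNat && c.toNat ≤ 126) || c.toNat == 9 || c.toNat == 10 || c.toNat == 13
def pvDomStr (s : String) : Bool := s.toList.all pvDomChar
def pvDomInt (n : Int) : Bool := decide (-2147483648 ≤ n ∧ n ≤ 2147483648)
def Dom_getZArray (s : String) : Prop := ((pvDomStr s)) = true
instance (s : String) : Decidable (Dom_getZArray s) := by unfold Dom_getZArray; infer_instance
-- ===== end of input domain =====

-- B replaces the Z-algorithm's l/r-window bookkeeping with a direct two-level scan
-- summing the longest common prefix of s and s[i:] (simpler, not faster).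
-- A raises IndexError on "" (z[0] = strLen on an empty list); Pre_ excludes it, B returns 0.

-- ===== PORT A =====
-- A's inner 'while r < strLen and s[r] == s[r-l]: r += 1'.  In-range indexing is
-- guaranteed by the guard, so getD's default is never the compared value out of range.
def extendR (cs : List Char) (l r : Nat) : Nat :=
  if h : r < cs.length ∧ cs.getD r ' ' = cs.getD (r - l) ' ' then extendR cs l (r + 1) else r
termination_by cs.length - r
decreasing_by omega

-- A's 'for i in range(1, strLen)' loop with state (z, l, r).  Python initialises
-- l = r = -1, values only ever used through the comparison 'r < i' at i = 1, where
-- 0 behaves identically (0 < 1), so l, r are carried as Nat initialised to 0.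
def loopA (cs : List Char) (i : Nat) (z : List Int) (l r : Nat) : List Int :=
  if i < cs.length then
    if r < i then
      let r' := extendR cs i i
      loopA cs (i + 1) (z.set i ((r' : Int) - (i : Int))) i (r' - 1)
    else
      let k := i - l
      if z.getD k 0 < (r : Int) - (i : Int) + 1 then
        loopA cs (i + 1) (z.set i (z.getD k 0)) l r
      else
        let r' := extendR cs i r
        loopA cs (i + 1) (z.set i ((r' : Int) - (i : Int))) i (r' - 1)
  else z
termination_by cs.length - i
decreasing_by all_goals omega

def getZArray (s : String) : Int :=
  (loopA s.toList 1 ((List.replicate s.toList.length (0 : Int)).set 0 (s.toList.length : Int)) 0 0).foldl (· + ·) 0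

-- ===== PORT B =====
-- B's inner 'while i + k < n and s[i+k] == s[k]: k += 1'
def lcpFrom (cs : List Char) (i k : Nat) : Nat :=
  if h : i + k < cs.length ∧ cs.getD (i + k) ' ' = cs.getD k ' ' then lcpFrom cs i (k + 1) else k
termination_by cs.length - (i + k)
decreasing_by omega

def getZArray_alt (s : String) : Int :=
  (List.range s.toList.length).foldl (fun acc i => acc + (lcpFrom s.toList i 0 : Int)) 0

-- ===== PRECONDITION & SPEC =====
-- Pre_ excludes exactly the empty string, on which A raises IndexError (z[0] = strLen).
def Pre_getZArray (s : String) : Prop := s ≠ ""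
instance (s : String) : Decidable (Pre_getZArray s) := by unfold Pre_getZArray; infer_instance
def pvWitness_getZArray : String := "abacaba"

def Spec_getZArray (s : String) (out : Int) : Prop := out = getZArray_alt s
instance (s : String) (out : Int) : Decidable (Spec_getZArray s out) := by unfold Spec_getZArray; infer_instance

-- ===== CLAIM (what is proved, stated in full; the proofs are below) =====
def Claim_equal_getZArray : Prop := ∀ (s : String), Dom_getZArray s → Pre_getZArray s → Spec_getZArray s (getZArray s)

-- ===== LEMMAS AND PROOFS =====

-- every position below lcpFrom matches
lemma lcp_match (cs : List Char) (i k : Nat) :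
    ∀ j, k ≤ j → j < lcpFrom cs i k →
      i + j < cs.length ∧ cs.getD (i + j) ' ' = cs.getD j ' ' := by
  induction k using lcpFrom.induct cs i with
  | case1 k h ih =>
    intro j hk hj
    rcases Nat.eq_or_lt_of_le hk with rfl | hk'
    · exact h
    · exact ih j hk' (by rwa [lcpFrom, dif_pos h] at hj)
  | case2 k h =>
    intro j hk hj
    rw [lcpFrom, dif_neg h] at hj; omega

-- the position at lcpFrom does not match
lemma lcp_stop (cs : List Char) (i k : Nat) :
    ¬ (i + lcpFrom cs i k < cs.length ∧
       cs.getD (i + lcpFrom cs i k) ' ' = cs.getD (lcpFrom cs i k) ' ') := by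
  induction k using lcpFrom.induct cs i with
  | case1 k h ih => rwa [lcpFrom, dif_pos h]
  | case2 k h => rwa [lcpFrom, dif_neg h]

-- uniqueness: any m ≥ k with all-below matching and a stop at m equals lcpFrom cs i k
lemma lcp_unique (cs : List Char) (i k m : Nat) (hkm : k ≤ m)
    (hmat : ∀ j, k ≤ j → j < m → i + j < cs.length ∧ cs.getD (i + j) ' ' = cs.getD j ' ')
    (hstop : ¬ (i + m < cs.length ∧ cs.getD (i + m) ' ' = cs.getD m ' ')) :
    lcpFrom cs i k = m := by
  induction k using lcpFrom.induct cs i with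
  | case1 k h ih =>
    rw [lcpFrom, dif_pos h]
    have hk : k ≠ m := by rintro rfl; exact hstop h
    have hkm' : k + 1 ≤ m := by omega
    exact ih hkm' (fun j hj hjm => hmat j (by omega) hjm)
  | case2 k h =>
    rw [lcpFrom, dif_neg h]
    by_contra hne
    exact h (hmat k le_rfl (by omega))

-- lower bound from a matching prefix
lemma lcp_ge (cs : List Char) (i m : Nat)
    (hmat : ∀ j, j < m → i + j < cs.length ∧ cs.getD (i + j) ' ' = cs.getD j ' ') :
    m ≤ lcpFrom cs i 0 := by
  by_contra hlt
  exact lcp_stop cs i 0 (hmat _ (by omega))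

-- restarting the scan after k already-matched positions gives the same value
lemma lcp_restart (cs : List Char) (i k : Nat)
    (hmat : ∀ j, j < k → i + j < cs.length ∧ cs.getD (i + j) ' ' = cs.getD j ' ') :
    lcpFrom cs i k = lcpFrom cs i 0 :=
  lcp_unique cs i k _ (lcp_ge cs i k hmat)
    (fun j _ hj => lcp_match cs i 0 j (Nat.zero_le _) hj) (lcp_stop cs i 0)

lemma lcp_zero (cs : List Char) : lcpFrom cs 0 0 = cs.length :=
  lcp_unique cs 0 0 _ (Nat.zero_le _)
    (fun j _ hj => ⟨by omega, by rw [Nat.zero_add]⟩) (by omega)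

-- extendR computes l + lcpFrom cs l (r - l)
lemma extendR_eq (cs : List Char) (l r : Nat) (hlr : l ≤ r) :
    extendR cs l r = l + lcpFrom cs l (r - l) := by
  induction r using extendR.induct cs l with
  | case1 r h ih =>
    have hc : l + (r - l) < cs.length ∧ cs.getD (l + (r - l)) ' ' = cs.getD (r - l) ' ' := by
      rwa [Nat.add_sub_cancel' hlr]
    have hstep : lcpFrom cs l (r - l) = lcpFrom cs l (r - l + 1) := by
      conv_lhs => rw [lcpFrom]
      rw [dif_pos hc]
    have harith : r + 1 - l = r - l + 1 := by omega
    rw [extendR, dif_pos h, ih (by omega), hstep, harith]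
  | case2 r h =>
    have hc : ¬ (l + (r - l) < cs.length ∧ cs.getD (l + (r - l)) ' ' = cs.getD (r - l) ' ') := by
      rwa [Nat.add_sub_cancel' hlr]
    have hstep : lcpFrom cs l (r - l) = r - l := by
      rw [lcpFrom, dif_neg hc]
    rw [extendR, dif_neg h, hstep]
    omega

-- copy case of the Z algorithm: if k + Z k < Z l then Z (l + k) = Z k
lemma lcp_copy (cs : List Char) (l k : Nat)
    (h : k + lcpFrom cs k 0 < lcpFrom cs l 0) :
    lcpFrom cs (l + k) 0 = lcpFrom cs k 0 := by
  have hml := lcp_match cs l 0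
  have hmk := lcp_match cs k 0
  refine lcp_unique cs (l + k) 0 _ (Nat.zero_le _) (fun j _ hj => ?_) ?_
  · have h1 := hml (k + j) (Nat.zero_le _) (by omega)
    have h2 := hmk j (Nat.zero_le _) hj
    refine ⟨by omega, ?_⟩
    calc cs.getD (l + k + j) ' ' = cs.getD (k + j) ' ' := by
          rw [← Nat.add_assoc] at h1; exact h1.2
      _ = cs.getD j ' ' := h2.2
  · have h1 := hml (k + lcpFrom cs k 0) (Nat.zero_le _) h
    have h3 := lcp_stop cs k 0
    intro hc
    apply h3
    refine ⟨by omega, ?_⟩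
    calc cs.getD (k + lcpFrom cs k 0) ' ' = cs.getD (l + (k + lcpFrom cs k 0)) ' ' := h1.2.symm
      _ = cs.getD (lcpFrom cs k 0) ' ' := by rw [← Nat.add_assoc]; exact hc.2

-- getD after set
lemma getD_set_eq (z : List Int) (a : Nat) (v : Int) (ha : a < z.length) :
    (z.set a v).getD a 0 = v := by
  simp [List.getD_eq_getElem?_getD, ha]

lemma getD_set_ne (z : List Int) (a j : Nat) (v : Int) (h : a ≠ j) :
    (z.set a v).getD j 0 = z.getD j 0 := by
  simp [List.getD_eq_getElem?_getD, List.getElem?_set_ne h]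

lemma loopA_length (cs : List Char) (i : Nat) (z : List Int) (l r : Nat) :
    (loopA cs i z l r).length = z.length := by
  induction i, z, l, r using loopA.induct cs with
  | case1 i z l r h1 h2 r' ih => rw [loopA, if_pos h1, if_pos h2]; simpa using ih
  | case2 i z l r h1 h2 k h3 ih => rw [loopA, if_pos h1, if_neg h2, if_pos h3]; simpa using ih
  | case3 i z l r h1 h2 k h3 r' ih => rw [loopA, if_pos h1, if_neg h2, if_neg h3]; simpa using ih
  | case4 i z l r h1 => rw [loopA, if_neg h1]

-- main invariant: loopA fills z with the Z-values (= lcpFrom · 0)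
lemma loopA_spec (cs : List Char) (i : Nat) (z : List Int) (l r : Nat)
    (hi : 1 ≤ i) (hli : l < i) (hlen : z.length = cs.length)
    (hwin : i ≤ r → r + 1 = l + lcpFrom cs l 0) (hlr : i ≤ r → 1 ≤ l)
    (hz : ∀ j, j < i → z.getD j 0 = (lcpFrom cs j 0 : Int)) :
    ∀ j, j < cs.length → (loopA cs i z l r).getD j 0 = (lcpFrom cs j 0 : Int) := by
  induction i, z, l, r using loopA.induct cs with
  | case1 i z l r h1 h2 r' ih =>
    rw [loopA, if_pos h1, if_pos h2]
    have hr' : extendR cs i i = i + lcpFrom cs i 0 := by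
      rw [extendR_eq cs i i le_rfl, Nat.sub_self]
    have hrr : r' = i + lcpFrom cs i 0 := hr'
    refine ih (by omega) (by omega) (by simpa using hlen) (fun _ => by omega) (fun _ => by omega) ?_
    intro j hj
    rcases Nat.lt_or_ge j i with hj' | hj'
    · rw [getD_set_ne _ _ _ _ (by omega)]; exact hz j hj'
    · have hji : j = i := by omega
      rw [hji, getD_set_eq _ _ _ (by omega), hrr]
      push_cast; ring
  | case2 i z l r h1 h2 k h3 ih =>
    rw [loopA, if_pos h1, if_neg h2, if_pos h3]
    -- copy case: z[i-l] < r - i + 1, so Z i = Z (i-l)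
    have hir : i ≤ r := by omega
    have hw := hwin hir
    have hl1 : 1 ≤ l := hlr hir
    have hzk : z.getD (i - l) 0 = (lcpFrom cs (i - l) 0 : Int) := hz (i - l) (by omega)
    have h3' : z.getD (i - l) 0 < (r : Int) - (i : Int) + 1 := h3
    rw [hzk] at h3'
    have hcopy : lcpFrom cs i 0 = lcpFrom cs (i - l) 0 := by
      have hik : i = l + (i - l) := by omega
      have hcp := lcp_copy cs l (i - l) (by omega)
      rw [← hik] at hcp
      exact hcp
    refine ih (by omega) (by omega) (by simpa using hlen) (fun _ => hw) (fun _ => hl1) ?_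
    intro j hj
    rcases Nat.lt_or_ge j i with hj' | hj'
    · rw [getD_set_ne _ _ _ _ (by omega)]; exact hz j hj'
    · have hji : j = i := by omega
      rw [hji, getD_set_eq _ _ _ (by omega), hzk, hcopy]
  | case3 i z l r h1 h2 k h3 r' ih =>
    rw [loopA, if_pos h1, if_neg h2, if_neg h3]
    -- extend case: z[i-l] ≥ r - i + 1; positions i..r already match the prefix
    have hir : i ≤ r := by omega
    have hw := hwin hir
    have hl1 : 1 ≤ l := hlr hir
    have hzk : z.getD (i - l) 0 = (lcpFrom cs (i - l) 0 : Int) := hz (i - l) (by omega)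
    have h3' : ¬ z.getD (i - l) 0 < (r : Int) - (i : Int) + 1 := h3
    rw [hzk] at h3'
    have hkz : (lcpFrom cs l 0) - (i - l) ≤ lcpFrom cs (i - l) 0 := by
      omega
    have hml := lcp_match cs l 0
    have hmk := lcp_match cs (i - l) 0
    have hmat : ∀ j, j < lcpFrom cs l 0 - (i - l) →
        i + j < cs.length ∧ cs.getD (i + j) ' ' = cs.getD j ' ' := by
      intro j hj
      have ha := hml ((i - l) + j) (Nat.zero_le _) (by omega)
      have hb := hmk j (Nat.zero_le _) (by omega)
      refine ⟨by omega, ?_⟩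
      calc cs.getD (i + j) ' ' = cs.getD ((i - l) + j) ' ' := by
            rw [← ha.2]; congr 1; omega
        _ = cs.getD j ' ' := hb.2
    have hr' : extendR cs i r = i + lcpFrom cs i 0 := by
      rw [extendR_eq cs i r hir, lcp_restart cs i (r - i) (fun j hj => hmat j (by omega))]
    have hrr : r' = i + lcpFrom cs i 0 := hr'
    refine ih (by omega) (by omega) (by simpa using hlen) (fun _ => by omega) (fun _ => by omega) ?_
    intro j hj
    rcases Nat.lt_or_ge j i with hj' | hj'
    · rw [getD_set_ne _ _ _ _ (by omega)]; exact hz j hj'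
    · have hji : j = i := by omega
      rw [hji, getD_set_eq _ _ _ (by omega), hrr]
      push_cast; ring
  | case4 i z l r h1 =>
    rw [loopA, if_neg h1]
    intro j hj
    exact hz j (by omega)

-- the final z list is the list of Z-values
lemma loopA_result (cs : List Char) (hne : cs ≠ []) :
    loopA cs 1 ((List.replicate cs.length (0 : Int)).set 0 (cs.length : Int)) 0 0 =
      (List.range cs.length).map (fun i => (lcpFrom cs i 0 : Int)) := by
  have hlen0 : ((List.replicate cs.length (0 : Int)).set 0 (cs.length : Int)).length = cs.length := by
    simp
  have hn : 0 < cs.length := List.length_pos_iff.mpr hne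
  apply List.ext_getElem
  · rw [loopA_length, hlen0]; simp
  · intro j hj1 hj2
    have hj : j < cs.length := by rw [loopA_length, hlen0] at hj1; exact hj1
    have hmain := loopA_spec cs 1 _ 0 0 le_rfl (by omega) hlen0 (by omega) (by omega)
      (fun j hj => by
        interval_cases j
        rw [getD_set_eq _ _ _ (by simpa using hn), lcp_zero])
      j hj
    rw [List.getD_eq_getElem?_getD, List.getElem?_eq_getElem hj1] at hmain
    simp only [Option.getD_some] at hmain
    rw [hmain]
    simp

-- folding (+) over the mapped list equals B's accumulating fold
lemma fold_map_eq (cs : List Char) :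
    ((List.range cs.length).map (fun i => (lcpFrom cs i 0 : Int))).foldl (· + ·) 0 =
      (List.range cs.length).foldl (fun acc i => acc + (lcpFrom cs i 0 : Int)) 0 := by
  rw [List.foldl_map]

-- ===== VERDICT (by name: the statement is the Claim_ definition above) =====
theorem getZArray_spec : Claim_equal_getZArray := by
  intro s _ hpre
  unfold Spec_getZArray getZArray getZArray_alt
  have hne : s.toList ≠ [] := by
    intro h
    apply hpre
    have h2 := congrArg String.ofList h
    simpa using h2
  rw [loopA_result s.toList hne, fold_map_eq]
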